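-- pv_equiv track=rewrite | github.com/janschachtschabel/skohub-ttl-generator | app.py | _get_vocabulary_metadata_suggestions
-- ===== SOURCE A (Python) =====
-- from typing import Dict, List, Optional, Tuple, Any
--
-- def _get_vocabulary_metadata_suggestions(data_sample: Dict) -> List[str]:
--     """Get vocabulary metadata suggestions based on data content"""
--     suggestions = []
--
--     # Analyze field names and sample values to suggest metadata
--     field_names = list(data_sample.keys())
--
--     # Simple heuristics for vocabulary metadata
--     if any('skill' in field.lower() for field in field_names):
--         suggestions.append("Title: Skills Vocabulary")
--         suggestions.append("Description: A vocabulary of skills and competencies")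
--         suggestions.append("Domain: Education and Training")
--     elif any('occupation' in field.lower() or 'job' in field.lower() for field in field_names):
--         suggestions.append("Title: Occupations Vocabulary")
--         suggestions.append("Description: A vocabulary of occupations and job roles")
--         suggestions.append("Domain: Employment and Labor")
--     elif any('topic' in field.lower() or 'subject' in field.lower() for field in field_names):
--         suggestions.append("Title: Topics Vocabulary")
--         suggestions.append("Description: A vocabulary of topics and subjects")
--         suggestions.append("Domain: Knowledge Organization")
--     else:
--         suggestions.append("Title: Custom Vocabulary")
--         suggestions.append("Description: A SKOS vocabulary for domain-specific concepts")
--         suggestions.append("Domain: General")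
--
--     return suggestions
-- ===== SOURCE B (Python) =====
-- from typing import Dict, List
--
-- _TABLE = [
--     ("Skills Vocabulary", "A vocabulary of skills and competencies", "Education and Training"),
--     ("Occupations Vocabulary", "A vocabulary of occupations and job roles", "Employment and Labor"),
--     ("Topics Vocabulary", "A vocabulary of topics and subjects", "Knowledge Organization"),
--     ("Custom Vocabulary", "A SKOS vocabulary for domain-specific concepts", "General"),
-- ]
--
-- def _rank(field: str) -> int:
--     f = field.lower()
--     if "skill" in f:
--         return 0
--     if "occupation" in f or "job" in f:
--         return 1
--     if "topic" in f or "subject" in f: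
--         return 2
--     return 3
--
-- def _get_vocabulary_metadata_suggestions(data_sample: Dict) -> List[str]:
--     """Get vocabulary metadata suggestions based on data content"""
--     best = min((_rank(field) for field in data_sample), default=3)
--     title, description, domain = _TABLE[best]
--     return ["Title: " + title, "Description: " + description, "Domain: " + domain]
-- ===== Notes on version B (the rewrite author's own statement) =====
-- stated objective: alternative
-- what changed: Replaces the priority-ordered any-scans over the whole field list with a single pass that scores each field with a numeric rank, reduces by min (default 3), and indexes a metadata table with the minimum to assemble the three strings.
import Mathlib
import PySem

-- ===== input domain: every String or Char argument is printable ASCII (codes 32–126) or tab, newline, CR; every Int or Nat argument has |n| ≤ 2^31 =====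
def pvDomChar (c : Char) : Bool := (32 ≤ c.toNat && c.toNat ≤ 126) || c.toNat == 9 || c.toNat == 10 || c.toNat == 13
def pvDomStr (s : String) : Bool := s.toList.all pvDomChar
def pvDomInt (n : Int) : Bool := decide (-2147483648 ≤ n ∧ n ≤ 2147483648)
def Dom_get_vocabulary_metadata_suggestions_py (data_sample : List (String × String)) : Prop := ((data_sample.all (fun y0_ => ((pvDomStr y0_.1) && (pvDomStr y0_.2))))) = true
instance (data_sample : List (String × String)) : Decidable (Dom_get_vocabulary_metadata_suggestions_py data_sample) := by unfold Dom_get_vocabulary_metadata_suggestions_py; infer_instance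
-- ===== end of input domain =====

-- ===== PORT A =====
-- B replaces A's priority-ordered any-scans by a per-field numeric rank, a min-reduction and a table lookup (objective: alternative).
def get_vocabulary_metadata_suggestions_py (data_sample : List (String × String)) : List String :=
  let suggestions : List String := []
  let field_names := data_sample.map (fun p => p.1)
  if field_names.any (fun field => PySem.Str.isIn "skill" (PySem.Str.lower field)) then
    suggestions ++ ["Title: Skills Vocabulary"]
      ++ ["Description: A vocabulary of skills and competencies"]
      ++ ["Domain: Education and Training"]
  else if field_names.any (fun field =>
      PySem.Str.isIn "occupation" (PySem.Str.lower field) || PySem.Str.isIn "job" (PySem.Str.lower field)) then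
    suggestions ++ ["Title: Occupations Vocabulary"]
      ++ ["Description: A vocabulary of occupations and job roles"]
      ++ ["Domain: Employment and Labor"]
  else if field_names.any (fun field =>
      PySem.Str.isIn "topic" (PySem.Str.lower field) || PySem.Str.isIn "subject" (PySem.Str.lower field)) then
    suggestions ++ ["Title: Topics Vocabulary"]
      ++ ["Description: A vocabulary of topics and subjects"]
      ++ ["Domain: Knowledge Organization"]
  else
    suggestions ++ ["Title: Custom Vocabulary"]
      ++ ["Description: A SKOS vocabulary for domain-specific concepts"]
      ++ ["Domain: General"]

-- ===== PORT B =====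
def pvTable : List (String × String × String) :=
  [("Skills Vocabulary", "A vocabulary of skills and competencies", "Education and Training"),
   ("Occupations Vocabulary", "A vocabulary of occupations and job roles", "Employment and Labor"),
   ("Topics Vocabulary", "A vocabulary of topics and subjects", "Knowledge Organization"),
   ("Custom Vocabulary", "A SKOS vocabulary for domain-specific concepts", "General")]

def pvRank (field : String) : Nat :=
  let f := PySem.Str.lower field
  if PySem.Str.isIn "skill" f then 0
  else if PySem.Str.isIn "occupation" f || PySem.Str.isIn "job" f then 1
  else if PySem.Str.isIn "topic" f || PySem.Str.isIn "subject" f then 2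
  else 3

-- Python's min(gen, default=3): 3 on empty, otherwise the minimum of the ranks.
def pvMinRank : List String → Nat
  | [] => 3
  | f :: rest => min (pvRank f) (pvMinRank rest)

def get_vocabulary_metadata_suggestions_py_alt (data_sample : List (String × String)) : List String :=
  let best := pvMinRank (data_sample.map (fun p => p.1))
  let t := (PySem.List.pyGet? pvTable (Int.ofNat best)).getD ("", "", "")
  ["Title: " ++ t.1, "Description: " ++ t.2.1, "Domain: " ++ t.2.2]

-- ===== PRECONDITION & SPEC =====
def Spec_get_vocabulary_metadata_suggestions_py (data_sample : List (String × String)) (out : List String) : Prop := out = get_vocabulary_metadata_suggestions_py_alt data_sample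
instance (data_sample : List (String × String)) (out : List String) : Decidable (Spec_get_vocabulary_metadata_suggestions_py data_sample out) := by unfold Spec_get_vocabulary_metadata_suggestions_py; infer_instance

-- ===== CLAIM (what is proved, stated in full; the proofs are below) =====
def Claim_equal_get_vocabulary_metadata_suggestions_py : Prop := ∀ (data_sample : List (String × String)), Dom_get_vocabulary_metadata_suggestions_py data_sample → Spec_get_vocabulary_metadata_suggestions_py data_sample (get_vocabulary_metadata_suggestions_py data_sample)

-- ===== LEMMAS AND PROOFS =====

theorem pvMinRank_step (b1 b2 b3 b4 b5 a1 a2 a3 : Bool) :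
    min (if b1 then 0 else if b2 || b3 then 1 else if b4 || b5 then 2 else 3)
        (if a1 then 0 else if a2 then 1 else if a3 then 2 else 3) =
      (if b1 || a1 then 0 else if b2 || b3 || a2 then 1 else if b4 || b5 || a3 then 2 else (3 : Nat)) := by
  revert b1 b2 b3 b4 b5 a1 a2 a3; decide

-- The minimum rank is 0/1/2/3 exactly according to A's priority-ordered any-tests.
theorem pvMinRank_eq (l : List String) :
    pvMinRank l =
      if l.any (fun f => PySem.Str.isIn "skill" (PySem.Str.lower f)) then 0
      else if l.any (fun f => PySem.Str.isIn "occupation" (PySem.Str.lower f) || PySem.Str.isIn "job" (PySem.Str.lower f)) then 1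
      else if l.any (fun f => PySem.Str.isIn "topic" (PySem.Str.lower f) || PySem.Str.isIn "subject" (PySem.Str.lower f)) then 2
      else 3 := by
  induction l with
  | nil => simp [pvMinRank]
  | cons f rest ih =>
      simp only [pvMinRank, pvRank, ih, List.any_cons]
      exact pvMinRank_step _ _ _ _ _ _ _ _

-- ===== VERDICT (by name: the statement is the Claim_ definition above) =====
theorem get_vocabulary_metadata_suggestions_py_spec : Claim_equal_get_vocabulary_metadata_suggestions_py := by
  intro ds _
  unfold Spec_get_vocabulary_metadata_suggestions_py
  unfold get_vocabulary_metadata_suggestions_py get_vocabulary_metadata_suggestions_py_alt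
  simp only [pvMinRank_eq (ds.map (fun p => p.1))]
  split_ifs <;> rfl
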